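-- pv_equiv track=rewrite | github.com/quemeb/USC_research | Huaiyu/AnnoQ/whole_genome_inclusive_exclusive.py | total_annotation_agreement
-- ===== SOURCE A (Python) =====
-- def total_annotation_agreement(uni_clean, AN, SN, VP):
--     """
--     This function compares full aggrement of the unique clean list vs. all
--     other individual lists
--
--     Parameters
--     ----------
--     uni_clean : TYPE
--         unique clean list for each SNP.
--     AN : TYPE
--         Annovar list.
--     SN : TYPE
--         SnpEff list.
--     VP : TYPE
--         VEP list.
--
--     Returns
--     -------
--     TYPE
--         DESCRIPTION.
--
--     """
--
--     # Initialize a dictionary to store various counts.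
--     counters = {
--         'all_agree': 0,
--         'two_agree': 0,
--         'one_agree': 0,
--         'none_agree': 0,
--         'SA': 0,
--         'SV': 0,
--         'AV': 0,
--         'A': 0,
--         'S': 0,
--         'V': 0,
--     }
--     # Mapping for two-agree scenarios.
--     two_agree_mapping = {
--         'AS': 'SA',
--         'SV': 'SV',
--         'AV': 'AV'
--     }
--
--     # Mapping for one-agree scenarios.
--     one_agree_mapping = {
--         'A': 'A',
--         'S': 'S',
--         'V': 'V'
--     }
--
--     # Iterate through the lists
--     for i in range(len(uni_clean)):
--         temp = 0  # Temporary counter for the loop.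
--         des = []  # List to store which arrays agree with uni_clean.
--
--         zize = len(uni_clean[i])  # Length of the union set for this iteration.
--
--         # Check if AN agrees with uni_clean and update counters.
--         if zize == len(AN[i]):
--             temp += 1
--             des.append('A')
--
--         # Check if SN agrees with uni_clean and update counters.
--         if zize == len(SN[i]):
--             temp += 1
--             des.append('S')
--
--         # Check if VP agrees with uni_clean and update counters.
--         if zize == len(VP[i]):
--             temp += 1
--             des.append('V')
--
--         # Convert list to a string for easier matching.
--         des_str = ''.join(des)
--
--         # Update the relevant counter based on how many arrays agreed with uni_clean.
--         if temp == 3:  # All agree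
--             counters['all_agree'] += 1
--         elif temp == 2:  # Exactly two agree
--             counters['two_agree'] += 1
--             counters[two_agree_mapping[des_str]] += 1
--         elif temp == 1:  # Only one agrees
--             counters['one_agree'] += 1
--             counters[one_agree_mapping[des_str]] += 1
--         elif temp == 0:  # None agree
--             counters['none_agree'] += 1
--
--     return counters  # Return the counters dictionary.
-- ===== SOURCE B (Python) =====
-- def total_annotation_agreement(uni_clean, AN, SN, VP):
--     # Tabulate-then-aggregate: first map each SNP to its agreement pattern
--     # (which of A/S/V match the unique-clean length), then derive every
--     # counter from pattern counts in a second pass.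
--     pats = [(len(uni_clean[i]) == len(AN[i]),
--              len(uni_clean[i]) == len(SN[i]),
--              len(uni_clean[i]) == len(VP[i]))
--             for i in range(len(uni_clean))]
--
--     def cnt(a, s, v):
--         return pats.count((a, s, v))
--
--     ASV = cnt(True, True, True)
--     AS = cnt(True, True, False)
--     AV = cnt(True, False, True)
--     SV = cnt(False, True, True)
--     A = cnt(True, False, False)
--     S = cnt(False, True, False)
--     V = cnt(False, False, True)
--     N = cnt(False, False, False)
--
--     return {
--         'all_agree': ASV,
--         'two_agree': AS + AV + SV,
--         'one_agree': A + S + V,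
--         'none_agree': N,
--         'SA': AS,
--         'SV': SV,
--         'AV': AV,
--         'A': A,
--         'S': S,
--         'V': V,
--     }
-- ===== Notes on version B (the rewrite author's own statement) =====
-- stated objective: alternative
-- what changed: B replaces A's classify-and-increment-ten-counters loop (with string-keyed mapping dicts) by a tabulate-then-aggregate decomposition: one pass maps every SNP to its (A,S,V) agreement-pattern triple, and all ten counters are derived from the eight pattern counts in a second pass.
import Mathlib
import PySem

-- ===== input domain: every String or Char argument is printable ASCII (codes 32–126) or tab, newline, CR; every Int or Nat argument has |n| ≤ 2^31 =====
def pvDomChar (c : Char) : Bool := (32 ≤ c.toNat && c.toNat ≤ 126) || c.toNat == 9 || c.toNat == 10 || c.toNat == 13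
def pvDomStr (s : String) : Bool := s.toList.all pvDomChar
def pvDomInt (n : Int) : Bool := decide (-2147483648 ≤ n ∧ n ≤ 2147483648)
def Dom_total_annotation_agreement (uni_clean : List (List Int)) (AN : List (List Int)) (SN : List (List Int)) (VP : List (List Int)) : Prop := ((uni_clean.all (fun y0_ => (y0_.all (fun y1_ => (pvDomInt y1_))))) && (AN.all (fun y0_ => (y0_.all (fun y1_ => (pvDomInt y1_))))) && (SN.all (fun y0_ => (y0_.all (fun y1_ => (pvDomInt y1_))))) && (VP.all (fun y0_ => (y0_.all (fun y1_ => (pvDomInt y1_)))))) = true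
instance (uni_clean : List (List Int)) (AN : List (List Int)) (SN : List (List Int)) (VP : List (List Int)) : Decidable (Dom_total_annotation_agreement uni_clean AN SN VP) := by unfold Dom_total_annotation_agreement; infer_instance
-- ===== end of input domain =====

-- B tabulates per-SNP agreement patterns first and derives all ten counters from pattern
-- counts in a second pass (objective: alternative decomposition, same O(n) cost).

-- ===== PORT A =====
-- the local constant dicts of A
def pvCountersInit : PySem.Dict String Int := PySem.Dict.ofList
  [("all_agree", 0), ("two_agree", 0), ("one_agree", 0), ("none_agree", 0),
   ("SA", 0), ("SV", 0), ("AV", 0), ("A", 0), ("S", 0), ("V", 0)]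
def pvTwoAgreeMapping : PySem.Dict String String := PySem.Dict.ofList
  [("AS", "SA"), ("SV", "SV"), ("AV", "AV")]
def pvOneAgreeMapping : PySem.Dict String String := PySem.Dict.ofList
  [("A", "A"), ("S", "S"), ("V", "V")]

-- the body of A's "for i in range(len(uni_clean))" loop, step for step
def pvStepA (uni_clean AN SN VP : List (List Int)) (counters : PySem.Dict String Int) (i : Int) : PySem.Dict String Int :=
  let temp : Int := 0
  let des : List String := []
  -- Pre_ guarantees i is in range for all four lists, so pyGetD's default is never taken
  let zize := (PySem.List.pyGetD uni_clean i []).length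
  let (temp, des) := if zize == (PySem.List.pyGetD AN i []).length then (temp + 1, des ++ ["A"]) else (temp, des)
  let (temp, des) := if zize == (PySem.List.pyGetD SN i []).length then (temp + 1, des ++ ["S"]) else (temp, des)
  let (temp, des) := if zize == (PySem.List.pyGetD VP i []).length then (temp + 1, des ++ ["V"]) else (temp, des)
  let des_str := PySem.Str.join "" des
  -- counters[k] += 1 is modify k 0 (· + 1); every key used is present, so Python's KeyError never fires.
  if temp = 3 then counters.modify "all_agree" 0 (· + 1)
  else if temp = 2 then
    -- two_agree_mapping[des_str]: temp = 2 forces des_str ∈ {"AS","SV","AV"}, so the KeyError branch (get? = none) is unreachable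
    (counters.modify "two_agree" 0 (· + 1)).modify ((pvTwoAgreeMapping.get? des_str).getD "") 0 (· + 1)
  else if temp = 1 then
    (counters.modify "one_agree" 0 (· + 1)).modify ((pvOneAgreeMapping.get? des_str).getD "") 0 (· + 1)
  else if temp = 0 then counters.modify "none_agree" 0 (· + 1)
  else counters

def total_annotation_agreement (uni_clean : List (List Int)) (AN : List (List Int)) (SN : List (List Int)) (VP : List (List Int)) : List (String × Int) :=
  ((PySem.List.pyRange 0 (uni_clean.length : Int) 1).foldl (pvStepA uni_clean AN SN VP) pvCountersInit).items

-- ===== PORT B =====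
def total_annotation_agreement_alt (uni_clean : List (List Int)) (AN : List (List Int)) (SN : List (List Int)) (VP : List (List Int)) : List (String × Int) :=
  let pats := (PySem.List.pyRange 0 (uni_clean.length : Int) 1).map (fun i =>
    ((PySem.List.pyGetD uni_clean i []).length == (PySem.List.pyGetD AN i []).length,
     (PySem.List.pyGetD uni_clean i []).length == (PySem.List.pyGetD SN i []).length,
     (PySem.List.pyGetD uni_clean i []).length == (PySem.List.pyGetD VP i []).length))
  let cnt := fun a s v => (PySem.List.count pats (a, s, v) : Int)
  let ASV := cnt true true true
  let AS := cnt true true false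
  let AV := cnt true false true
  let SV := cnt false true true
  let A := cnt true false false
  let S := cnt false true false
  let V := cnt false false true
  let N := cnt false false false
  [("all_agree", ASV), ("two_agree", AS + AV + SV), ("one_agree", A + S + V), ("none_agree", N),
   ("SA", AS), ("SV", SV), ("AV", AV), ("A", A), ("S", S), ("V", V)]

-- ===== PRECONDITION & SPEC =====
-- Pre_ excludes exactly the inputs where Python A raises IndexError: AN, SN or VP shorter than uni_clean.
def Pre_total_annotation_agreement (uni_clean : List (List Int)) (AN : List (List Int)) (SN : List (List Int)) (VP : List (List Int)) : Prop :=
  uni_clean.length ≤ AN.length ∧ uni_clean.length ≤ SN.length ∧ uni_clean.length ≤ VP.length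
instance (uni_clean : List (List Int)) (AN : List (List Int)) (SN : List (List Int)) (VP : List (List Int)) : Decidable (Pre_total_annotation_agreement uni_clean AN SN VP) := by unfold Pre_total_annotation_agreement; infer_instance
def pvWitness_total_annotation_agreement : List (List Int) × List (List Int) × List (List Int) × List (List Int) :=
  ([[1], [1, 2], []], [[3], [4], [5, 6]], [[7], [], [8]], [[0], [1, 2], [3]])

def Spec_total_annotation_agreement (uni_clean : List (List Int)) (AN : List (List Int)) (SN : List (List Int)) (VP : List (List Int)) (out : List (String × Int)) : Prop := out = total_annotation_agreement_alt uni_clean AN SN VP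
instance (uni_clean : List (List Int)) (AN : List (List Int)) (SN : List (List Int)) (VP : List (List Int)) (out : List (String × Int)) : Decidable (Spec_total_annotation_agreement uni_clean AN SN VP out) := by unfold Spec_total_annotation_agreement; infer_instance

-- ===== CLAIM (what is proved, stated in full; the proofs are below) =====
def Claim_equal_total_annotation_agreement : Prop := ∀ (uni_clean : List (List Int)) (AN : List (List Int)) (SN : List (List Int)) (VP : List (List Int)), Dom_total_annotation_agreement uni_clean AN SN VP → Pre_total_annotation_agreement uni_clean AN SN VP → Spec_total_annotation_agreement uni_clean AN SN VP (total_annotation_agreement uni_clean AN SN VP)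

-- ===== LEMMAS AND PROOFS =====

-- the per-index agreement pattern both programs branch on
def pvPat (uni_clean AN SN VP : List (List Int)) (i : Int) : Bool × Bool × Bool :=
  ((PySem.List.pyGetD uni_clean i []).length == (PySem.List.pyGetD AN i []).length,
   (PySem.List.pyGetD uni_clean i []).length == (PySem.List.pyGetD SN i []).length,
   (PySem.List.pyGetD uni_clean i []).length == (PySem.List.pyGetD VP i []).length)

-- the dict A's loop state reaches after consuming a list of pattern triples, expressed by pattern counts
def pvTab (l : List (Bool × Bool × Bool)) : PySem.Dict String Int :=
  PySem.Dict.ofList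
    [("all_agree", (l.count (true, true, true) : Int)),
     ("two_agree", (l.count (true, true, false) : Int) + (l.count (true, false, true) : Int) + (l.count (false, true, true) : Int)),
     ("one_agree", (l.count (true, false, false) : Int) + (l.count (false, true, false) : Int) + (l.count (false, false, true) : Int)),
     ("none_agree", (l.count (false, false, false) : Int)),
     ("SA", (l.count (true, true, false) : Int)),
     ("SV", (l.count (false, true, true) : Int)),
     ("AV", (l.count (true, false, true) : Int)),
     ("A", (l.count (true, false, false) : Int)),
     ("S", (l.count (false, true, false) : Int)),
     ("V", (l.count (false, false, true) : Int))]

lemma pvStepA_tab (uni_clean AN SN VP : List (List Int)) (l : List (Bool × Bool × Bool)) (i : Int) :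
    pvStepA uni_clean AN SN VP (pvTab l) i = pvTab (l ++ [pvPat uni_clean AN SN VP i]) := by
  cases hA : ((PySem.List.pyGetD uni_clean i []).length == (PySem.List.pyGetD AN i []).length) <;>
  cases hS : ((PySem.List.pyGetD uni_clean i []).length == (PySem.List.pyGetD SN i []).length) <;>
  cases hV : ((PySem.List.pyGetD uni_clean i []).length == (PySem.List.pyGetD VP i []).length) <;>
    simp [pvStepA, pvPat, pvTab, hA, hS, hV, PySem.Dict.modify, PySem.Dict.ofList,
      PySem.Dict.insert, PySem.Dict.getD, PySem.Dict.get?, PySem.Dict.contains, PySem.Dict.empty,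
      PySem.Dict.update, PySem.Str.join, pvTwoAgreeMapping, pvOneAgreeMapping,
      List.count_append, List.count_nil, PySem.Chars.join, List.intercalate, List.intersperse,
      List.flatten, show String.ofList ['A', 'S'] = "AS" from rfl,
      show String.ofList ['S', 'V'] = "SV" from rfl, show String.ofList ['A', 'V'] = "AV" from rfl,
      show String.ofList ['A'] = "A" from rfl, show String.ofList ['S'] = "S" from rfl,
      show String.ofList ['V'] = "V" from rfl] <;> omega

lemma pvTab_items (l : List (Bool × Bool × Bool)) : (pvTab l).items =
    [("all_agree", (l.count (true, true, true) : Int)),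
     ("two_agree", (l.count (true, true, false) : Int) + (l.count (true, false, true) : Int) + (l.count (false, true, true) : Int)),
     ("one_agree", (l.count (true, false, false) : Int) + (l.count (false, true, false) : Int) + (l.count (false, false, true) : Int)),
     ("none_agree", (l.count (false, false, false) : Int)),
     ("SA", (l.count (true, true, false) : Int)),
     ("SV", (l.count (false, true, true) : Int)),
     ("AV", (l.count (true, false, true) : Int)),
     ("A", (l.count (true, false, false) : Int)),
     ("S", (l.count (false, true, false) : Int)),
     ("V", (l.count (false, false, true) : Int))] := by
  simp [pvTab, PySem.Dict.ofList, PySem.Dict.update, PySem.Dict.insert, PySem.Dict.contains,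
    PySem.Dict.empty]

lemma pvLoopA (uni_clean AN SN VP : List (List Int)) (n : Nat) :
    (PySem.List.pyRange 0 (n : Int) 1).foldl (pvStepA uni_clean AN SN VP) pvCountersInit
      = pvTab ((PySem.List.pyRange 0 (n : Int) 1).map (pvPat uni_clean AN SN VP)) := by
  induction n with
  | zero =>
    rw [Nat.cast_zero, show PySem.List.pyRange 0 0 1 = [] from rfl]
    simp only [List.foldl_nil, List.map_nil]
    decide
  | succ m ih =>
    rw [show ((m + 1 : Nat) : Int) = (m : Int) + 1 by push_cast; ring,
        PySem.List.pyRange_one_succ_right (by positivity), List.foldl_append, List.map_append, ih]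
    simp [pvStepA_tab]

-- ===== VERDICT (by name: the statement is the Claim_ definition above) =====
theorem total_annotation_agreement_spec : Claim_equal_total_annotation_agreement := by
  intro uni_clean AN SN VP _ _
  unfold Spec_total_annotation_agreement total_annotation_agreement total_annotation_agreement_alt
  rw [pvLoopA, pvTab_items]
  rfl
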